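-- pv_equiv track=rewrite | github.com/pansinyoung/python-lint | 624_Remove_Substrings.py | replace_first_occurance
-- ===== SOURCE A (Python) =====
-- from typing import Set
--
-- def replace_first_occurance(s: str, tar: str) -> Set[str]:
--     result = set()
--     start = 0
--     i = s.find(tar, start)
--     while i >= 0:
--         result.add(s[:i] + (s[i + len(tar):] if i + len(tar) <= len(s) else ''))
--         start = i + 1
--         i = s.find(tar, start)
--     return result
-- ===== SOURCE B (Python) =====
-- def replace_first_occurance(s: str, tar: str):
--     # Rabin-Karp: roll a window hash across s, verify hash hits by one direct comparison.
--     n, m = len(s), len(tar)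
--     if m == 0:
--         return {s}
--     result = set()
--     if m > n:
--         return result
--     B, M = 131, 1000000007
--     ht = 0
--     for c in tar:
--         ht = (ht * B + ord(c)) % M
--     hw = 0
--     for c in s[:m]:
--         hw = (hw * B + ord(c)) % M
--     pw = 1
--     for _ in range(m - 1):
--         pw = pw * B % M
--     i = 0
--     while True:
--         if hw == ht and s[i:i + m] == tar:
--             result.add(s[:i] + s[i + m:])
--         if i + m == n:
--             break
--         hw = ((hw - ord(s[i]) * pw) * B + ord(s[i + m])) % M
--         i += 1
--     return result
-- ===== Notes on version B (the rewrite author's own statement) =====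
-- stated objective: alternative
-- what changed: Replaces the str.find-driven scan with a Rabin-Karp rolling-hash matcher: it precomputes polynomial hashes of the pattern and of the first window, slides the window updating the hash in O(1) per position, and only on a hash hit verifies by one direct comparison before adding s[:i]+s[i+m:] to the set; empty/oversized patterns are handled up front.
import Mathlib
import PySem

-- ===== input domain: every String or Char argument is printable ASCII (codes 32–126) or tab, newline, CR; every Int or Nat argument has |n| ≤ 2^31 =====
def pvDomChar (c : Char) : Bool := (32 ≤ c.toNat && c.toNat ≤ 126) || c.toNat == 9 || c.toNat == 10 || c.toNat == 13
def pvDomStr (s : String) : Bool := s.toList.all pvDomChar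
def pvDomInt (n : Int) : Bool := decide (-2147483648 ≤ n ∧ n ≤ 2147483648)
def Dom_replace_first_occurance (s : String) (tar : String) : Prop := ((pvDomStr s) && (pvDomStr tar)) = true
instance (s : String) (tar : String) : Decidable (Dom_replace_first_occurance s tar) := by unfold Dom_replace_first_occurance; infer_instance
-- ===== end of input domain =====

-- B replaces A's str.find-driven scan by a Rabin-Karp rolling-hash matcher that
-- verifies hash hits by one direct comparison (alternative algorithm, same return value).

-- ===== PORT A =====
-- the while loop, ported as recursion with a fuel guard (the fuel only makes the
-- recursion total: start strictly increases, so len(s)+2 steps always suffice)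
def pvLoopA (cs ts : List Char) (fuel : Nat) (result : List String) (start : Int) : List String :=
  match fuel with
  | 0 => result
  | Nat.succ f =>
    let i := PySem.Chars.findFrom cs ts start none
    if 0 ≤ i then
      pvLoopA cs ts f
        (PySem.Set.add result (String.ofList
          (PySem.List.slice cs none (some i) ++
            (if i + (ts.length : Int) ≤ (cs.length : Int)
             then PySem.List.slice cs (some (i + (ts.length : Int))) none
             else []))))
        (i + 1)
    else result

def replace_first_occurance (s : String) (tar : String) : List String :=
  pvLoopA s.toList tar.toList (s.toList.length + 2) [] 0

-- ===== PORT B =====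
-- the while-True loop of Source B; i and the window hash hw advance together, the loop
-- breaks when i + m == n, so n - m + 1 iterations run (the fuel only makes it total).
-- ord(s[i]) / ord(s[i+m]) are ported as (cs.getD _ default).toNat: both indices are
-- in range at every use (i + ts.length < cs.length there), so getD is Python's s[_].
def pvLoopB (cs ts : List Char) (ht pw : Int) : Nat → Int → Nat → List String → List String
  | 0, _, _, r => r
  | Nat.succ f, hw, i, r =>
    let r' :=
      if hw == ht &&
         (PySem.List.slice cs (some (i : Int)) (some ((i : Int) + (ts.length : Int))) == ts) then
        PySem.Set.add r (String.ofList
          (PySem.List.slice cs none (some (i : Int)) ++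
           PySem.List.slice cs (some ((i : Int) + (ts.length : Int))) none))
      else r
    if i + ts.length = cs.length then r'
    else
      pvLoopB cs ts ht pw f
        (PySem.Int.mod
          ((hw - ((cs.getD i default).toNat : Int) * pw) * 131
            + ((cs.getD (i + ts.length) default).toNat : Int))
          1000000007)
        (i + 1) r'

def replace_first_occurance_alt (s : String) (tar : String) : List String :=
  let cs := s.toList
  let ts := tar.toList
  if ts.length = 0 then [s]
  else if cs.length < ts.length then []
  else
    let ht := ts.foldl (fun h c => PySem.Int.mod (h * 131 + (c.toNat : Int)) 1000000007) 0
    let hw := (PySem.List.slice cs none (some (ts.length : Int))).foldl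
      (fun h c => PySem.Int.mod (h * 131 + (c.toNat : Int)) 1000000007) 0
    let pw := (PySem.List.pyRange 0 ((ts.length : Int) - 1) 1).foldl
      (fun p _ => PySem.Int.mod (p * 131) 1000000007) 1
    pvLoopB cs ts ht pw (cs.length - ts.length + 1) hw 0 []

-- ===== PRECONDITION & SPEC =====
def Spec_replace_first_occurance (s : String) (tar : String) (out : List String) : Prop := out = replace_first_occurance_alt s tar
instance (s : String) (tar : String) (out : List String) : Decidable (Spec_replace_first_occurance s tar out) := by unfold Spec_replace_first_occurance; infer_instance

-- ===== CLAIM (what is proved, stated in full; the proofs are below) =====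
def Claim_equal_replace_first_occurance : Prop := ∀ (s : String) (tar : String), Dom_replace_first_occurance s tar → Spec_replace_first_occurance s tar (replace_first_occurance s tar)

-- ===== LEMMAS AND PROOFS =====

-- the string that both programs add for a match at position i
def pvPiece (cs : List Char) (m i : Nat) : String :=
  String.ofList (cs.take i ++ cs.drop (i + m))

-- the match positions ≥ k, in increasing order
def pvPosFrom (cs ts : List Char) (k : Nat) : List Nat :=
  (List.range (cs.length + 1)).filter (fun i => decide (k ≤ i) && decide (ts <+: cs.drop i))

def pvFold (cs : List Char) (m : Nat) (r : List String) (is : List Nat) : List String :=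
  is.foldl (fun r i => PySem.Set.add r (pvPiece cs m i)) r

-- the (un-reduced) polynomial value behind the rolling hash
def pvV (l : List Char) : Int := l.foldl (fun h c => h * 131 + (c.toNat : Int)) 0

lemma pvFindFrom_past (cs ts : List Char) (k : Int) (h0 : 0 ≤ k) (h : (cs.length : Int) < k) :
    PySem.Chars.findFrom cs ts k none = -1 := by
  unfold PySem.Chars.findFrom
  simp only []
  split_ifs with h1 h2 h3 <;> omega

lemma pvPrefix_infix_drop (cs ts : List Char) (k i : Nat) (hk : k ≤ i)
    (h : ts <+: cs.drop i) : ts <:+: cs.drop k := by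
  have hdd : List.drop (i - k) (cs.drop k) = cs.drop i := by
    rw [List.drop_drop]; congr 1; omega
  exact h.isInfix.trans (hdd ▸ (List.drop_suffix (i - k) (cs.drop k)).isInfix)

lemma pvPosFrom_nil (cs ts : List Char) (k : Nat) (h : ¬ ts <:+: cs.drop k) :
    pvPosFrom cs ts k = [] := by
  rw [pvPosFrom, List.filter_eq_nil_iff]
  intro i _ hi
  simp only [Bool.and_eq_true, decide_eq_true_eq] at hi
  exact h (pvPrefix_infix_drop cs ts k i hi.1 hi.2)

lemma pvPosFrom_past (cs ts : List Char) (k : Nat) (h : cs.length < k) :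
    pvPosFrom cs ts k = [] := by
  rw [pvPosFrom, List.filter_eq_nil_iff]
  intro i hi hp
  simp only [List.mem_range] at hi
  simp only [Bool.and_eq_true, decide_eq_true_eq] at hp
  omega

lemma pvPosFrom_cons (cs ts : List Char) (k j : Nat) (hkn : k ≤ cs.length) (hkj : k ≤ j)
    (hPj : ts <+: cs.drop j) (hmin : ∀ i, k ≤ i → i < j → ¬ ts <+: cs.drop i) :
    pvPosFrom cs ts k = j :: pvPosFrom cs ts (j + 1) := by
  have hjn : j ≤ cs.length := by
    by_contra hc
    push Not at hc
    have hdrop : cs.drop j = [] := List.drop_eq_nil_of_le (by omega)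
    have hts : ts = [] := List.prefix_nil.mp (hdrop ▸ hPj)
    exact (hmin k le_rfl (by omega)) (by simp [hts])
  have hsplit : cs.length + 1 = (j + 1) + (cs.length - j) := by omega
  unfold pvPosFrom
  rw [hsplit, List.range_add, List.filter_append, List.filter_append]
  have h1 : (List.range (j + 1)).filter
      (fun i => decide (k ≤ i) && decide (ts <+: cs.drop i)) = [j] := by
    rw [List.range_succ, List.filter_append, List.filter_eq_nil_iff.mpr ?_]
    · simp [hkj, hPj]
    · intro i hi hp
      simp only [List.mem_range] at hi
      simp only [Bool.and_eq_true, decide_eq_true_eq] at hp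
      exact hmin i hp.1 hi hp.2
  have h2 : (List.range (j + 1)).filter
      (fun i => decide (j + 1 ≤ i) && decide (ts <+: cs.drop i)) = [] := by
    rw [List.filter_eq_nil_iff]
    intro i hi hp
    simp only [List.mem_range] at hi
    simp only [Bool.and_eq_true, decide_eq_true_eq] at hp
    omega
  have h3 : ∀ x ∈ (List.range (cs.length - j)).map (fun i => j + 1 + i),
      (decide (k ≤ x) && decide (ts <+: cs.drop x))
        = (decide (j + 1 ≤ x) && decide (ts <+: cs.drop x)) := by
    intro x hx
    simp only [List.mem_map] at hx
    obtain ⟨y, _, rfl⟩ := hx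
    have e1 : k ≤ j + 1 + y := by omega
    have e2 : j + 1 ≤ j + 1 + y := by omega
    simp [e1, e2]
  rw [h1, h2, List.filter_congr h3]
  simp

lemma pvLoopA_eq (cs ts : List Char) :
    ∀ (fuel k : Nat) (r : List String), k ≤ cs.length + 1 → cs.length + 1 - k < fuel →
      pvLoopA cs ts fuel r (k : Int) = pvFold cs ts.length r (pvPosFrom cs ts k) := by
  intro fuel
  induction fuel with
  | zero => intro k r _ h; omega
  | succ f ih =>
    intro k r hk hfuel
    by_cases hpast : cs.length < k
    · have hfind := pvFindFrom_past cs ts (k : Int) (by positivity) (by exact_mod_cast hpast)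
      rw [pvLoopA, pvPosFrom_past cs ts k hpast]
      simp [hfind, pvFold]
    · push Not at hpast
      by_cases hneg : PySem.Chars.findFrom cs ts (k : Int) none = -1
      · have hinf := (PySem.Chars.findFrom_natCast_eq_neg_one_iff cs ts k hpast).mp hneg
        rw [pvLoopA, pvPosFrom_nil cs ts k hinf]
        simp [hneg, pvFold]
      · obtain ⟨hki, hpre, hmin⟩ := PySem.Chars.findFrom_natCast_spec cs ts k hpast hneg
        have hi0 : 0 ≤ PySem.Chars.findFrom cs ts (k : Int) none :=
          le_trans (by positivity) hki
        obtain ⟨j, hij⟩ : ∃ j : Nat, PySem.Chars.findFrom cs ts (k : Int) none = (j : Int) :=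
          ⟨_, (Int.toNat_of_nonneg hi0).symm⟩
        rw [hij] at hki hi0
        have hjt : (PySem.Chars.findFrom cs ts (k : Int) none).toNat = j := by
          rw [hij]; exact Int.toNat_natCast j
        rw [hjt] at hpre hmin
        have hkj : k ≤ j := by exact_mod_cast hki
        have hjm : j + ts.length ≤ cs.length := by
          have hlen := hpre.length_le
          rw [List.length_drop] at hlen
          have hjn : j ≤ cs.length := by
            by_contra hc
            push Not at hc
            have hdrop : cs.drop j = [] := List.drop_eq_nil_of_le (by omega)
            have hts : ts = [] := List.prefix_nil.mp (hdrop ▸ hpre)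
            exact (hmin k le_rfl (by omega)) (by simp [hts])
          omega
        have hcond : (j : Int) + (ts.length : Int) ≤ (cs.length : Int) := by exact_mod_cast hjm
        rw [pvLoopA]
        simp only [hij, hi0, if_pos, hcond]
        have hslice1 : PySem.List.slice cs none (some (j : Int)) = cs.take j :=
          PySem.List.slice_to_natCast cs j
        have hslice2 : PySem.List.slice cs (some ((j : Int) + (ts.length : Int))) none
            = cs.drop (j + ts.length) := by
          rw [show ((j : Int) + (ts.length : Int)) = ((j + ts.length : Nat) : Int) by push_cast; ring]
          exact PySem.List.slice_from_natCast cs (j + ts.length)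
        rw [hslice1, hslice2]
        rw [show ((j : Int) + 1) = ((j + 1 : Nat) : Int) by push_cast; ring]
        rw [ih (j + 1) _ (by omega) (by omega)]
        rw [pvPosFrom_cons cs ts k j hpast hkj hpre (fun i' h1 h2 => hmin i' h1 (by omega))]
        rfl

-- ---- B-side lemmas (Rabin-Karp) ----

lemma pvMod_pos : (0 : Int) < 1000000007 := by norm_num

lemma pvMod_eq (a : Int) : PySem.Int.mod a 1000000007 = a % 1000000007 :=
  PySem.Int.mod_eq_emod_of_pos pvMod_pos

-- a mod-reduced hash fold equals the un-reduced polynomial fold, reduced once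
lemma pvHash_fold (l : List Char) : ∀ (a : Int),
    l.foldl (fun h c => (h * 131 + (c.toNat : Int)) % 1000000007) (a % 1000000007)
      = (l.foldl (fun h c => h * 131 + (c.toNat : Int)) a) % 1000000007 := by
  induction l with
  | nil => intro a; rfl
  | cons c l ih =>
    intro a
    simp only [List.foldl_cons]
    have ha : Int.ModEq 1000000007 (a % 1000000007) a := Int.emod_emod_of_dvd a dvd_rfl
    have h : (a % 1000000007 * 131 + (c.toNat : Int)) % 1000000007
        = (a * 131 + (c.toNat : Int)) % 1000000007 :=
      (ha.mul_right 131).add_right _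
    rw [h, ih (a * 131 + (c.toNat : Int))]

lemma pvPw_fold {α : Type} (l : List α) : ∀ (a : Int),
    l.foldl (fun p _ => (p * 131) % 1000000007) (a % 1000000007)
      = (a * 131 ^ l.length) % 1000000007 := by
  induction l with
  | nil => intro a; simp
  | cons x l ih =>
    intro a
    simp only [List.foldl_cons]
    have ha : Int.ModEq 1000000007 (a % 1000000007) a := Int.emod_emod_of_dvd a dvd_rfl
    have h : (a % 1000000007 * 131) % 1000000007 = (a * 131) % 1000000007 := ha.mul_right 131
    rw [h, ih (a * 131), List.length_cons]
    congr 1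
    rw [pow_succ]
    ring

lemma pvV_from (l : List Char) : ∀ (a : Int),
    l.foldl (fun h c => h * 131 + (c.toNat : Int)) a = a * 131 ^ l.length + pvV l := by
  induction l with
  | nil => intro a; simp [pvV]
  | cons c l ih =>
    intro a
    rw [pvV, List.foldl_cons, List.foldl_cons, ih, ih ((0 : Int) * 131 + (c.toNat : Int)),
      List.length_cons, pow_succ]
    ring

lemma pvV_cons (c : Char) (l : List Char) :
    pvV (c :: l) = (c.toNat : Int) * 131 ^ l.length + pvV l := by
  rw [pvV, List.foldl_cons, pvV_from]
  ring_nf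

lemma pvV_append_singleton (l : List Char) (d : Char) :
    pvV (l ++ [d]) = pvV l * 131 + (d.toNat : Int) := by
  rw [pvV, List.foldl_append]
  rfl

-- the congruence behind the rolling update
lemma pvRoll_mod (v c p d : Int) :
    ((v % 1000000007 - c * (p % 1000000007)) * 131 + d) % 1000000007
      = ((v - c * p) * 131 + d) % 1000000007 := by
  have hv : Int.ModEq 1000000007 (v % 1000000007) v := Int.emod_emod_of_dvd v dvd_rfl
  have hp0 : Int.ModEq 1000000007 (p % 1000000007) p := Int.emod_emod_of_dvd p dvd_rfl
  have hp : Int.ModEq 1000000007 (c * (p % 1000000007)) (c * p) := hp0.mul_left c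
  exact (((hv.sub hp).mul_right 131).add_right d)

-- the rolling-hash step really moves the window one to the right
lemma pvRoll (cs ts : List Char) (i : Nat) (hlt : i + ts.length < cs.length) (hts : ts ≠ []) :
    ((pvV ((cs.drop i).take ts.length) % 1000000007
        - ((cs.getD i default).toNat : Int) * (131 ^ (ts.length - 1) % 1000000007)) * 131
      + ((cs.getD (i + ts.length) default).toNat : Int)) % 1000000007
    = pvV ((cs.drop (i + 1)).take ts.length) % 1000000007 := by
  have hm1 : 0 < ts.length := List.length_pos_of_ne_nil hts
  have hi : i < cs.length := by omega
  have him : i + ts.length < cs.length := hlt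
  have hw1 : (cs.drop i).take ts.length
      = cs.getD i default :: (cs.drop (i + 1)).take (ts.length - 1) := by
    have hdi : cs.drop i = cs.getD i default :: cs.drop (i + 1) := by
      conv_lhs => rw [List.drop_eq_getElem_cons hi]
      rw [List.getD_eq_getElem cs default hi]
    rw [hdi]
    cases hm : ts.length with
    | zero => exact absurd (List.length_eq_zero_iff.mp hm) hts
    | succ k => simp
  have hw2 : (cs.drop (i + 1)).take ts.length
      = (cs.drop (i + 1)).take (ts.length - 1) ++ [cs.getD (i + ts.length) default] := by
    have hlen : ((cs.drop (i + 1)).take (ts.length - 1)).length = ts.length - 1 := by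
      rw [List.length_take, List.length_drop]
      omega
    have : (cs.drop (i + 1)).take ts.length
        = (cs.drop (i + 1)).take (ts.length - 1) ++
            ((cs.drop (i + 1)).drop (ts.length - 1)).take 1 := by
      rw [← List.take_add]
      congr 1
      omega
    rw [this, List.drop_drop]
    congr 1
    have hidx : i + 1 + (ts.length - 1) = i + ts.length := by omega
    rw [hidx]
    rw [List.drop_eq_getElem_cons him, List.take_succ_cons, List.take_zero,
      List.getD_eq_getElem cs default him]
  have hlen' : ((cs.drop (i + 1)).take (ts.length - 1)).length = ts.length - 1 := by
    rw [List.length_take, List.length_drop]; omega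
  rw [pvRoll_mod, hw1, hw2, pvV_cons, pvV_append_singleton, hlen']
  congr 1
  ring

-- infix of the same length is the whole list
lemma pvInfix_length_eq (ts l : List Char) (h : ts <:+: l) (hl : l.length ≤ ts.length) :
    ts = l := by
  obtain ⟨u, v, huv⟩ := h
  have := congrArg List.length huv
  simp only [List.length_append] at this
  have hu : u = [] := List.length_eq_zero_iff.mp (by omega)
  have hv : v = [] := List.length_eq_zero_iff.mp (by omega)
  simp [hu, hv] at huv
  exact huv

lemma pvPosFrom_succ_of_not (cs ts : List Char) (i : Nat) (h : ¬ ts <+: cs.drop i) :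
    pvPosFrom cs ts i = pvPosFrom cs ts (i + 1) := by
  unfold pvPosFrom
  apply List.filter_congr
  intro x _
  by_cases hx : x = i
  · subst hx
    simp [h]
  · by_cases hxi : i ≤ x
    · have e1 : i + 1 ≤ x := by omega
      simp [hxi, e1]
    · have e1 : ¬ i + 1 ≤ x := by omega
      simp [hxi, e1]

-- the B loop, under its invariant (hw is the current window's hash), folds exactly
-- the matching positions from i on
lemma pvLoopB_eq (cs ts : List Char) (hts : ts ≠ []) :
    ∀ (fuel i : Nat) (r : List String), i + ts.length ≤ cs.length →
      cs.length - (i + ts.length) < fuel →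
      pvLoopB cs ts (pvV ts % 1000000007) (131 ^ (ts.length - 1) % 1000000007) fuel
        (pvV ((cs.drop i).take ts.length) % 1000000007) i r
      = pvFold cs ts.length r (pvPosFrom cs ts i) := by
  intro fuel
  induction fuel with
  | zero => intro i r _ h; omega
  | succ f ih =>
    intro i r hin hfuel
    have htake : ((cs.drop i).take ts.length).length = ts.length := by
      rw [List.length_take, List.length_drop]; omega
    have hslice : PySem.List.slice cs (some (i : Int)) (some ((i : Int) + (ts.length : Int)))
        = (cs.drop i).take ts.length := by
      rw [PySem.List.slice_natCast_add]
    have hcond : ((pvV ((cs.drop i).take ts.length) % 1000000007 == pvV ts % 1000000007) &&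
        (PySem.List.slice cs (some (i : Int)) (some ((i : Int) + (ts.length : Int))) == ts))
        = decide (ts <+: cs.drop i) := by
      rw [hslice]
      by_cases hp : ts <+: cs.drop i
      · have heq : (cs.drop i).take ts.length = ts :=
          ((List.prefix_iff_eq_take.mp hp).symm)
        simp [heq, hp]
      · have hne : ((cs.drop i).take ts.length == ts) = false := by
          rw [beq_eq_false_iff_ne]
          intro hc
          exact hp (List.prefix_iff_eq_take.mpr hc.symm)
        simp [hne, hp]
    rw [pvLoopB]
    simp only [hcond]
    have hpiece : String.ofList
        (PySem.List.slice cs none (some (i : Int)) ++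
          PySem.List.slice cs (some ((i : Int) + (ts.length : Int))) none)
        = pvPiece cs ts.length i := by
      rw [PySem.List.slice_to_natCast,
        show ((i : Int) + (ts.length : Int)) = ((i + ts.length : Nat) : Int) by push_cast; ring,
        PySem.List.slice_from_natCast, pvPiece]
    by_cases hbreak : i + ts.length = cs.length
    · rw [if_pos hbreak, hpiece]
      -- last position: pvPosFrom i is [i] or [] depending on the match at i
      have hnil : pvPosFrom cs ts (i + 1) = [] := by
        apply pvPosFrom_nil
        intro hinf
        have hlen := hinf.length_le
        rw [List.length_drop] at hlen
        have : ts.length = 0 := by omega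
        exact hts (List.length_eq_zero_iff.mp this)
      by_cases hp : ts <+: cs.drop i
      · rw [pvPosFrom_cons cs ts i i (by omega) le_rfl hp (fun j h1 h2 => absurd h1 (by omega)),
          hnil]
        simp [hp, pvFold]
      · have hnil0 : pvPosFrom cs ts i = [] := by
          apply pvPosFrom_nil
          intro hinf
          have : ts = cs.drop i := by
            apply pvInfix_length_eq ts (cs.drop i) hinf
            rw [List.length_drop]
            omega
          exact hp (this ▸ List.prefix_refl _)
        rw [hnil0]
        simp [hp, pvFold]
    · have hlt : i + ts.length < cs.length := by omega
      simp only [if_neg hbreak]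
      rw [pvMod_eq, pvRoll cs ts i hlt hts]
      rw [ih (i + 1) _ (by omega) (by omega)]
      by_cases hp : ts <+: cs.drop i
      · rw [pvPosFrom_cons cs ts i i (by omega) le_rfl hp (fun j h1 h2 => absurd h1 (by omega))]
        simp only [hp, decide_true, if_pos, hpiece]
        rfl
      · rw [pvPosFrom_succ_of_not cs ts i hp]
        simp [hp]

-- A's result for the empty pattern is {s}
lemma pvFold_const (x : String) :
    ∀ (is : List Nat) (r : List String), x ∈ r →
      is.foldl (fun r _ => PySem.Set.add r x) r = r := by
  intro is
  induction is with
  | nil => intro r _; rfl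
  | cons i is ih =>
    intro r hx
    rw [List.foldl_cons]
    have : PySem.Set.add r x = r := by
      simp [PySem.Set.add, hx]
    rw [this]
    exact ih r hx

lemma pvPiece_zero (cs : List Char) (i : Nat) : pvPiece cs 0 i = String.ofList cs := by
  rw [pvPiece]
  congr 1
  rw [Nat.add_zero, List.take_append_drop]

lemma pvFold_empty_pattern (cs : List Char) :
    pvFold cs 0 [] (pvPosFrom cs [] 0) = [String.ofList cs] := by
  have hpos : pvPosFrom cs [] 0 = List.range (cs.length + 1) := by
    unfold pvPosFrom
    apply List.filter_eq_self.mpr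
    intro a _
    simp
  rw [pvFold, hpos]
  have hfun : ∀ (is : List Nat) (r : List String),
      is.foldl (fun r i => PySem.Set.add r (pvPiece cs 0 i)) r
        = is.foldl (fun r _ => PySem.Set.add r (String.ofList cs)) r := by
    intro is
    induction is with
    | nil => intro r; rfl
    | cons i is ih => intro r; rw [List.foldl_cons, List.foldl_cons, pvPiece_zero, ih]
  rw [hfun, List.range_succ_eq_map, List.foldl_cons]
  have hadd : PySem.Set.add ([] : List String) (String.ofList cs) = [String.ofList cs] := by
    simp [PySem.Set.add, PySem.Set.contains]
  rw [hadd]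
  exact pvFold_const (String.ofList cs) _ _ (by simp)

lemma pvOfList_toList (s : String) : String.ofList s.toList = s := by
  simp [String.ofList]

-- ===== VERDICT (by name: the statement is the Claim_ definition above) =====
lemma pvMain (s tar : String) :
    pvFold s.toList tar.toList.length [] (pvPosFrom s.toList tar.toList 0)
      = replace_first_occurance_alt s tar := by
  unfold replace_first_occurance_alt
  by_cases h0 : tar.toList.length = 0
  · have hts : tar.toList = [] := List.length_eq_zero_iff.mp h0
    rw [hts]
    simp only [List.length_nil]
    rw [if_pos trivial, pvFold_empty_pattern, pvOfList_toList]
  · by_cases hbig : s.toList.length < tar.toList.length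
    · simp only [if_neg h0, if_pos hbig]
      rw [pvPosFrom_nil s.toList tar.toList 0 ?_]
      · rfl
      · intro hinf
        have := hinf.length_le
        rw [List.drop_zero] at this
        omega
    · simp only [if_neg h0, if_neg hbig]
      have hts : tar.toList ≠ [] := fun h => h0 (by simp [h])
      have hmn : tar.toList.length ≤ s.toList.length := by omega
      have hModFun : ∀ (h : Int) (c : Char),
          PySem.Int.mod (h * 131 + (c.toNat : Int)) 1000000007
            = (h * 131 + (c.toNat : Int)) % 1000000007 := fun h c => pvMod_eq _
      have hPwFun : ∀ (p : Int), PySem.Int.mod (p * 131) 1000000007 = (p * 131) % 1000000007 :=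
        fun p => pvMod_eq _
      -- the three seed folds
      have hht : tar.toList.foldl
          (fun h c => PySem.Int.mod (h * 131 + (c.toNat : Int)) 1000000007) 0
          = pvV tar.toList % 1000000007 := by
        simp only [hModFun]
        rw [show (0 : Int) = 0 % 1000000007 from rfl, pvHash_fold]
        rfl
      have hhw : (PySem.List.slice s.toList none (some (tar.toList.length : Int))).foldl
          (fun h c => PySem.Int.mod (h * 131 + (c.toNat : Int)) 1000000007) 0
          = pvV ((s.toList.drop 0).take tar.toList.length) % 1000000007 := by
        rw [PySem.List.slice_to_natCast, List.drop_zero]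
        simp only [hModFun]
        rw [show (0 : Int) = 0 % 1000000007 from rfl, pvHash_fold]
        rfl
      have hpw : (PySem.List.pyRange 0 ((tar.toList.length : Int) - 1) 1).foldl
          (fun p _ => PySem.Int.mod (p * 131) 1000000007) 1
          = 131 ^ (tar.toList.length - 1) % 1000000007 := by
        rw [show ((tar.toList.length : Int) - 1) = ((tar.toList.length - 1 : Nat) : Int) by omega,
          PySem.List.pyRange_zero_natCast, List.foldl_map]
        simp only [hPwFun]
        rw [show (1 : Int) = 1 % 1000000007 from rfl, pvPw_fold]
        rw [List.length_range, one_mul]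
      rw [hht, hhw, hpw,
        pvLoopB_eq s.toList tar.toList hts (s.toList.length - tar.toList.length + 1) 0 []
          (by omega) (by omega)]

-- ===== VERDICT (by name: the statement is the Claim_ definition above) =====
theorem replace_first_occurance_spec : Claim_equal_replace_first_occurance := by
  intro s tar _
  unfold Spec_replace_first_occurance replace_first_occurance
  rw [show (0 : Int) = ((0 : Nat) : Int) by rfl]
  rw [pvLoopA_eq s.toList tar.toList (s.toList.length + 2) 0 [] (by omega) (by omega)]
  exact pvMain s tar
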